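/- GENERATED by tools/from_farm_form.py from farm/worked/cos/Proof.lean (a worked proof of the farm's unit `cos`,
   accepted by the verdict) — do not edit. -/
import Asan.CheckWalk
import ProgX.Base.Spec.Units.cos

open X86 X86.User Asan ProgX.Base

set_option maxRecDepth 4000
set_option maxHeartbeats 4000000

/-- `cos(x)` satisfies its contract: `mov edi, 1 ; call sincos_quadrant ; ret` (libm.c:237). One call to a function with a
contract; the shadow clause of the callee's pre is ours with the stack pointer 8 lower, and its post (no shadow byte written)
composes with the push of the return address into ours. -/
theorem ProgX.Base.Spec.Proved.cos_ok : ProgX.Base.Spec.cos.Statement := by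
  intro Lay hLay μ hμ u₀ hcode h_sq others frames u ret he hpre
  v_entry he
  have hsh : ShadowPre others frames u := hpre
  have hsp := hsh.rsp
  -- the callee's contract, instantiated with our ghosts, so that the walker finds it
  have hsq := h_sq others frames
  -- 0x102e60 (libm.c:237): `mov edi, 1 ; call sincos_quadrant`
  u_walk hcode [hμ.vendor] span [ProgX.Base.L.textLo, ProgX.Base.L.textHi] side (v_side)
  · -- call_inv: DF and the MXCSR masks at the callee's entry
    v_inv
  · -- the callee's precondition: the shadow layer with the stack pointer 8 lower; the push of the return address is off the shadow
    have hun : ShadowUntouched u.mem s_102e65.mem := by v_untouched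
    have hrsp : (s_102e65.reg .rsp).toNat + 8 = (u.reg .rsp).toNat := by
      rw [w_rsp]
      u_omega
    refine ⟨?_, hsh.offText⟩
    rw [hrsp]
    exact (hsh.inv.lower (by omega) (by omega) (by omega)).untouched hun
  -- 0x102e6a (libm.c:238): after the return of `sincos_quadrant`: what its contract says, in terms of OUR entry state
  have hpost : ShadowUntouched s_102e65.mem s_102e65r.mem := w_post
  have w_eq := ProgX.Base.conv_code_eqOn w_code
  simp only [X86.User.Spec.footprint, vspec, w_rsp_102e65] at w_same
  -- the return address is still at [rsp]: the callee wrote below its own entry rsp only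
  have hsame' : Mem.SameExcept [⟨(u.reg .rsp).toNat - 32, (u.reg .rsp).toNat⟩] u.mem s_102e65r.mem := by
    u_same
  clear w_same
  have hs0 : UInt64.ofNat (s_102e65r.mem.readLE (u.reg .rsp) 8) = ret := by
    u_frame he_retAddr
  -- DF and the MXCSR masks after the return: the convention's invariant of `Returned`
  have hdf : s_102e65r.flags .df = false := (show abiInv _ from w_inv).1
  have hmx : s_102e65r.mxcsr &&& 0x1F80 = 0x1F80 := (show abiInv _ from w_inv).2
  -- 0x102e6a (libm.c:238): `ret`
  u_walk hcode [hμ.vendor] span [ProgX.Base.L.textLo, ProgX.Base.L.textHi] side (v_side)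
  -- the state after the `ret`: the contract's `Returned`
  refine ReachVia.done ?_
  v_returned
  -- the post: no shadow byte written, by our push of the return address (off the shadow) nor by the callee (its post)
  have hun : ShadowUntouched u.mem s_102e65.mem := by v_untouched
  show ShadowUntouched u.mem s_102e6a.mem
  rw [w_mem]
  exact Mem.EqOn.trans hun hpost
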